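-- pv_equiv track=rewrite | github.com/BBeee/Machine-Learning | Implementation 3/code/ada_clean.py | count
-- ===== SOURCE A (Python) =====
-- def count(data,y,ithFeature,threshold):
--     posL,negL = 0,0
--     posR,negR = 0,0
--     for i,_ in enumerate(data):
--         if data[i][ithFeature] <= threshold:
--             if y[i] == 1:
--                 posL += 1
--             else:
--                 negL += 1
--         else:
--             if y[i] == 1:
--                 posR += 1
--             else:
--                 negR += 1
--     return posL,negL,posR,negR
-- ===== SOURCE B (Python) =====
-- def count(data, y, ithFeature, threshold):
--     # three aggregates + algebraic identities instead of four branch counters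
--     left = [row[ithFeature] <= threshold for row in data]
--     leftTotal = sum(left)
--     posTotal = sum(lab == 1 for lab in y[:len(data)])
--     posL = sum(l and lab == 1 for l, lab in zip(left, y))
--     negL = leftTotal - posL
--     posR = posTotal - posL
--     negR = len(data) - leftTotal - posR
--     return posL, negL, posR, negR
-- ===== Notes on version B (the rewrite author's own statement) =====
-- stated objective: alternative
-- what changed: B maintains three aggregates (left-side total, positive total over the consumed labels, left-and-positive count) and derives negL/posR/negR algebraically, instead of A's four parallel branch counters updated in a nested if.
import Mathlib
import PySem

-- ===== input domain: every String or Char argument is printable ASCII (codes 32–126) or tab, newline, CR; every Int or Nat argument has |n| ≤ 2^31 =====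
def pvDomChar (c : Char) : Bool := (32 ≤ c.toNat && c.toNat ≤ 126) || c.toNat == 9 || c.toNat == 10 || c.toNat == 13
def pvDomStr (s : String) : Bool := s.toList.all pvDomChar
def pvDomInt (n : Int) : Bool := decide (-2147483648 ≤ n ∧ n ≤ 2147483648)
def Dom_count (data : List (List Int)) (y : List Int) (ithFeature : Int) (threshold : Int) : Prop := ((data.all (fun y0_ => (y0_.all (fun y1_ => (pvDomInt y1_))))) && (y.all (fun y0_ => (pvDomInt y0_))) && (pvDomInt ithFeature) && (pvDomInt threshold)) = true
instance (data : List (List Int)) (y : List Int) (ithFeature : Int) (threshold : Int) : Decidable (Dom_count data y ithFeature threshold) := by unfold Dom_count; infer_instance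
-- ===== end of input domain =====

-- B maintains three aggregates and derives the other counters algebraically; same result, different decomposition.

-- ===== PORT A =====
def count (data : List (List Int)) (y : List Int) (ithFeature : Int) (threshold : Int) : Int × Int × Int × Int :=
  (PySem.List.enumerate data 0).foldl
    (fun (s : Int × Int × Int × Int) (p : Int × List Int) =>
      if PySem.List.pyGetD p.2 ithFeature 0 ≤ threshold then
        if PySem.List.pyGetD y p.1 0 = 1 then (s.1 + 1, s.2.1, s.2.2.1, s.2.2.2)
        else (s.1, s.2.1 + 1, s.2.2.1, s.2.2.2)
      else
        if PySem.List.pyGetD y p.1 0 = 1 then (s.1, s.2.1, s.2.2.1 + 1, s.2.2.2)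
        else (s.1, s.2.1, s.2.2.1, s.2.2.2 + 1))
    (0, 0, 0, 0)

-- ===== PORT B =====
def count_alt (data : List (List Int)) (y : List Int) (ithFeature : Int) (threshold : Int) : Int × Int × Int × Int :=
  let left := data.map (fun row => decide (PySem.List.pyGetD row ithFeature 0 ≤ threshold))
  let leftTotal : Int := (left.countP id : Int)
  let posTotal : Int := ((y.take data.length).countP (fun lab => lab == 1) : Int)
  let posL : Int := ((left.zip y).countP (fun p => p.1 && (p.2 == 1)) : Int)
  let negL := leftTotal - posL
  let posR := posTotal - posL
  let negR := (data.length : Int) - leftTotal - posR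
  (posL, negL, posR, negR)

-- ===== PRECONDITION & SPEC =====
-- Pre_ excludes exactly the inputs where the Python raises IndexError: y shorter than data, or ithFeature out of range for some row.
def Pre_count (data : List (List Int)) (y : List Int) (ithFeature : Int) (threshold : Int) : Prop :=
  data.length ≤ y.length ∧ ∀ row ∈ data, PySem.Raise.InRange row.length ithFeature
instance (data : List (List Int)) (y : List Int) (ithFeature : Int) (threshold : Int) : Decidable (Pre_count data y ithFeature threshold) := by unfold Pre_count; infer_instance
def pvWitness_count : List (List Int) × List Int × Int × Int := ([[1], [3]], [1, 0], 0, 2)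

def Spec_count (data : List (List Int)) (y : List Int) (ithFeature : Int) (threshold : Int) (out : Int × Int × Int × Int) : Prop := out = count_alt data y ithFeature threshold
instance (data : List (List Int)) (y : List Int) (ithFeature : Int) (threshold : Int) (out : Int × Int × Int × Int) : Decidable (Spec_count data y ithFeature threshold out) := by unfold Spec_count; infer_instance

-- ===== CLAIM (what is proved, stated in full; the proofs are below) =====
def Claim_equal_count : Prop := ∀ (data : List (List Int)) (y : List Int) (ithFeature : Int) (threshold : Int), Dom_count data y ithFeature threshold → Pre_count data y ithFeature threshold → Spec_count data y ithFeature threshold (count data y ithFeature threshold)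

-- ===== LEMMAS AND PROOFS =====

-- four classification predicates over a (row, label) pair
def pvQPL (ith thr : Int) (p : List Int × Int) : Bool :=
  decide (PySem.List.pyGetD p.1 ith 0 ≤ thr) && (p.2 == 1)
def pvQNL (ith thr : Int) (p : List Int × Int) : Bool :=
  decide (PySem.List.pyGetD p.1 ith 0 ≤ thr) && !(p.2 == 1)
def pvQPR (ith thr : Int) (p : List Int × Int) : Bool :=
  !decide (PySem.List.pyGetD p.1 ith 0 ≤ thr) && (p.2 == 1)
def pvQNR (ith thr : Int) (p : List Int × Int) : Bool :=
  !decide (PySem.List.pyGetD p.1 ith 0 ≤ thr) && !(p.2 == 1)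

-- A's loop computed in closed form over data.zip (y.drop k)
set_option maxRecDepth 4096 in
theorem loopA (ith thr : Int) (data : List (List Int)) : ∀ (y : List Int) (k : Nat) (a b c d : Int),
    data.length + k ≤ y.length →
    (PySem.List.enumerate data (k : Int)).foldl
      (fun (s : Int × Int × Int × Int) (p : Int × List Int) =>
        if PySem.List.pyGetD p.2 ith 0 ≤ thr then
          if PySem.List.pyGetD y p.1 0 = 1 then (s.1 + 1, s.2.1, s.2.2.1, s.2.2.2)
          else (s.1, s.2.1 + 1, s.2.2.1, s.2.2.2)
        else
          if PySem.List.pyGetD y p.1 0 = 1 then (s.1, s.2.1, s.2.2.1 + 1, s.2.2.2)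
          else (s.1, s.2.1, s.2.2.1, s.2.2.2 + 1)) (a, b, c, d)
    = (a + ((data.zip (y.drop k)).countP (pvQPL ith thr) : Int),
       b + ((data.zip (y.drop k)).countP (pvQNL ith thr) : Int),
       c + ((data.zip (y.drop k)).countP (pvQPR ith thr) : Int),
       d + ((data.zip (y.drop k)).countP (pvQNR ith thr) : Int)) := by
  induction data with
  | nil => intro y k a b c d h; simp [PySem.List.enumerate_nil]
  | cons row rest ih =>
    intro y k a b c d h
    have hk : k < y.length := by simp at h; omega
    have hdrop : y.drop k = y[k] :: y.drop (k + 1) := List.drop_eq_getElem_cons hk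
    have hget : PySem.List.pyGetD y (k : Int) 0 = y[k] := by
      rw [PySem.List.pyGetD_natCast]; exact List.getD_eq_getElem y 0 hk
    have hrec : rest.length + (k + 1) ≤ y.length := by simp at h ⊢; omega
    have hcast : ((k : Int) + 1) = ((k + 1 : Nat) : Int) := by push_cast; ring
    rw [PySem.List.enumerate_cons, List.foldl_cons, hdrop, List.zip_cons_cons,
      List.countP_cons, List.countP_cons, List.countP_cons, List.countP_cons]
    simp only [hget, hcast]
    by_cases h1 : PySem.List.pyGetD row ith 0 ≤ thr <;> by_cases h2 : y[k] = 1
    · rw [if_pos h1, if_pos h2, ih y (k + 1) _ _ _ _ hrec]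
      have e1 : pvQPL ith thr (row, y[k]) = true := by simp [pvQPL, h1, h2]
      have e2 : pvQNL ith thr (row, y[k]) = false := by simp [pvQNL, h1, h2]
      have e3 : pvQPR ith thr (row, y[k]) = false := by simp [pvQPR, h1, h2]
      have e4 : pvQNR ith thr (row, y[k]) = false := by simp [pvQNR, h1, h2]
      simp only [e1, e2, e3, e4, if_true, Prod.mk.injEq]
      push_cast
      omega
    · rw [if_pos h1, if_neg h2, ih y (k + 1) _ _ _ _ hrec]
      have e1 : pvQPL ith thr (row, y[k]) = false := by simp [pvQPL, h1, h2]
      have e2 : pvQNL ith thr (row, y[k]) = true := by simp [pvQNL, h1, h2]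
      have e3 : pvQPR ith thr (row, y[k]) = false := by simp [pvQPR, h1, h2]
      have e4 : pvQNR ith thr (row, y[k]) = false := by simp [pvQNR, h1, h2]
      simp only [e1, e2, e3, e4, if_true, Prod.mk.injEq]
      push_cast
      omega
    · rw [if_neg h1, if_pos h2, ih y (k + 1) _ _ _ _ hrec]
      have e1 : pvQPL ith thr (row, y[k]) = false := by simp [pvQPL, h1, h2]
      have e2 : pvQNL ith thr (row, y[k]) = false := by simp [pvQNL, h1, h2]
      have e3 : pvQPR ith thr (row, y[k]) = true := by simp [pvQPR, h1, h2]
      have e4 : pvQNR ith thr (row, y[k]) = false := by simp [pvQNR, h1, h2]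
      simp only [e1, e2, e3, e4, if_true, Prod.mk.injEq]
      push_cast
      omega
    · rw [if_neg h1, if_neg h2, ih y (k + 1) _ _ _ _ hrec]
      have e1 : pvQPL ith thr (row, y[k]) = false := by simp [pvQPL, h1, h2]
      have e2 : pvQNL ith thr (row, y[k]) = false := by simp [pvQNL, h1, h2]
      have e3 : pvQPR ith thr (row, y[k]) = false := by simp [pvQPR, h1, h2]
      have e4 : pvQNR ith thr (row, y[k]) = true := by simp [pvQNR, h1, h2]
      simp only [e1, e2, e3, e4, if_true, Prod.mk.injEq]
      push_cast
      omega

-- B's three aggregates expressed over data.zip y (single induction)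
theorem closedB (ith thr : Int) : ∀ (data : List (List Int)) (y : List Int),
    data.length ≤ y.length →
    (data.countP (fun row => decide (PySem.List.pyGetD row ith 0 ≤ thr))
        = (data.zip y).countP (pvQPL ith thr) + (data.zip y).countP (pvQNL ith thr))
    ∧ ((y.take data.length).countP (fun lab => lab == 1)
        = (data.zip y).countP (pvQPL ith thr) + (data.zip y).countP (pvQPR ith thr))
    ∧ (((data.map (fun row => decide (PySem.List.pyGetD row ith 0 ≤ thr))).zip y).countP
          (fun p => p.1 && (p.2 == 1)) = (data.zip y).countP (pvQPL ith thr))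
    ∧ (data.length
        = (data.zip y).countP (pvQPL ith thr) + (data.zip y).countP (pvQNL ith thr)
          + (data.zip y).countP (pvQPR ith thr) + (data.zip y).countP (pvQNR ith thr)) := by
  intro data
  induction data with
  | nil => intro y h; simp
  | cons row rest ih =>
    intro y h
    cases y with
    | nil => simp at h
    | cons lab ys =>
      have hlen : rest.length ≤ ys.length := by simp at h; omega
      obtain ⟨i1, i2, i3, i4⟩ := ih ys hlen
      by_cases h1 : PySem.List.pyGetD row ith 0 ≤ thr <;> by_cases h2 : lab = 1 <;>
        refine ⟨?_, ?_, ?_, ?_⟩ <;>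
        simp [pvQPL, pvQNL, pvQPR, pvQNR, h1, h2] <;>
        omega

-- ===== VERDICT (by name: the statement is the Claim_ definition above) =====
theorem count_spec : Claim_equal_count := by
  intro data y ith thr _ hpre
  obtain ⟨hlen, -⟩ := hpre
  unfold Spec_count count
  have hB : count_alt data y ith thr =
      ((((data.map (fun row => decide (PySem.List.pyGetD row ith 0 ≤ thr))).zip y).countP
          (fun p => p.1 && (p.2 == 1)) : Int),
        ((data.map (fun row => decide (PySem.List.pyGetD row ith 0 ≤ thr))).countP id : Int)
          - (((data.map (fun row => decide (PySem.List.pyGetD row ith 0 ≤ thr))).zip y).countP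
              (fun p => p.1 && (p.2 == 1)) : Int),
        (((y.take data.length).countP (fun lab => lab == 1) : Int)
          - (((data.map (fun row => decide (PySem.List.pyGetD row ith 0 ≤ thr))).zip y).countP
              (fun p => p.1 && (p.2 == 1)) : Int)),
        ((data.length : Int)
          - ((data.map (fun row => decide (PySem.List.pyGetD row ith 0 ≤ thr))).countP id : Int)
          - (((y.take data.length).countP (fun lab => lab == 1) : Int)
              - (((data.map (fun row => decide (PySem.List.pyGetD row ith 0 ≤ thr))).zip y).countP
                  (fun p => p.1 && (p.2 == 1)) : Int)))) := rfl
  rw [hB]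
  have hA := loopA ith thr data y 0 0 0 0 0 (by omega)
  rw [Nat.cast_zero] at hA
  rw [hA, List.drop_zero]
  obtain ⟨e1, e2, e3, e4⟩ := closedB ith thr data y hlen
  simp only [List.countP_map, Function.comp_def, id_eq, zero_add, e1, e2, e3, Prod.mk.injEq]
  push_cast [e4]
  refine ⟨trivial, by ring, by ring, by ring⟩
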